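-- pv_equiv track=rewrite | github.com/amplejoe/py_utils | utils.py | get_string_before_char
-- ===== SOURCE A (Python) =====
-- def get_string_before_char(input_string, stop_char):
--     """Cuts out substring from input_string until a certain character.
--     Info: Returns tuple: (cut out string w/o stop_char, rest of input_string w/o stop_character)
--           i.e. stop_char is lost in any case!
--     """
--     cur_substring = ""
--     rest_string = input_string
--     for c in input_string:
--         rest_string = rest_string[1:]  # cut 1 char from string (in any case)
--         if c != stop_char:
--             cur_substring += c
--         else:
--             break
--     return cur_substring, rest_string
-- ===== SOURCE B (Python) =====
-- def get_string_before_char(input_string, stop_char):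
--     idx = next((i for i, c in enumerate(input_string) if c == stop_char),
--                len(input_string))
--     return input_string[:idx], input_string[idx + 1:]
-- ===== Notes on version B (the rewrite author's own statement) =====
-- stated objective: faster
-- what changed: Replaces A's loop maintaining two growing/shrinking string accumulators (quadratic re-copying) with a single scan for the first index where a character equals stop_char, followed by two slices.
import Mathlib
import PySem

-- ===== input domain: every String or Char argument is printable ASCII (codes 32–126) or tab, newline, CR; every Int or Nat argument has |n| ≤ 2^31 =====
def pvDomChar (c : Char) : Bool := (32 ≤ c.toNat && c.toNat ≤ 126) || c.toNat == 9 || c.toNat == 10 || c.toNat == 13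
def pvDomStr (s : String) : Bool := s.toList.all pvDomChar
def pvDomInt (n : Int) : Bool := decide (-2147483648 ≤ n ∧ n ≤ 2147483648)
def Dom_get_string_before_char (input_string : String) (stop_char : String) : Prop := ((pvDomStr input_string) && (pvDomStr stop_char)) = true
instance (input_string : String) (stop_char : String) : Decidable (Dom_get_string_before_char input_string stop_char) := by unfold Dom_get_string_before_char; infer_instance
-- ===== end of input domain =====

-- B replaces A's two string accumulators with a first-match index scan plus two slices (simpler decomposition).


-- ===== PORT A =====
-- loop state: cur_substring and rest_string (as char lists); rest := rest[1:] each step, break on c == stop_char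
def getBeforeLoopA (cs : List Char) (cur : List Char) (rest : List Char) (stop : String) :
    List Char × List Char :=
  match cs with
  | [] => (cur, rest)
  | c :: cs' =>
      let rest' := rest.drop 1
      if String.mk [c] ≠ stop then getBeforeLoopA cs' (cur ++ [c]) rest' stop
      else (cur, rest')

def get_string_before_char (input_string : String) (stop_char : String) : List String :=
  let r := getBeforeLoopA input_string.toList [] input_string.toList stop_char
  [String.mk r.1, String.mk r.2]

-- ===== PORT B =====
-- first index whose single-char string equals stop_char (length if none), then slice
def get_string_before_char_alt (input_string : String) (stop_char : String) : List String :=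
  let cs := input_string.toList
  let idx := cs.findIdx (fun c => String.mk [c] == stop_char)
  [String.mk (cs.take idx), String.mk (cs.drop (idx + 1))]

-- ===== PRECONDITION & SPEC =====
def Spec_get_string_before_char (input_string : String) (stop_char : String) (out : List String) : Prop := out = get_string_before_char_alt input_string stop_char
instance (input_string : String) (stop_char : String) (out : List String) : Decidable (Spec_get_string_before_char input_string stop_char out) := by unfold Spec_get_string_before_char; infer_instance

-- ===== CLAIM (what is proved, stated in full; the proofs are below) =====
def Claim_equal_get_string_before_char : Prop := ∀ (input_string : String) (stop_char : String), Dom_get_string_before_char input_string stop_char → Spec_get_string_before_char input_string stop_char (get_string_before_char input_string stop_char)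

-- ===== LEMMAS AND PROOFS =====
theorem getBeforeLoopA_eq (stop : String) :
    ∀ (cs cur : List Char),
      getBeforeLoopA cs cur cs stop =
        (cur ++ cs.take (cs.findIdx (fun c => String.mk [c] == stop)),
         cs.drop (cs.findIdx (fun c => String.mk [c] == stop) + 1)) := by
  intro cs
  induction cs with
  | nil => intro cur; simp [getBeforeLoopA]
  | cons c cs' ih =>
      intro cur
      by_cases h : String.mk [c] = stop
      · simp [getBeforeLoopA, h, List.findIdx_cons]
      · have hb : (String.mk [c] == stop) = false := by
          simp [h]
        simp [getBeforeLoopA, h, List.findIdx_cons, hb, ih]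

-- ===== VERDICT (by name: the statement is the Claim_ definition above) =====
theorem get_string_before_char_spec : Claim_equal_get_string_before_char := by
  intro s stop _
  unfold Spec_get_string_before_char get_string_before_char get_string_before_char_alt
  simp [getBeforeLoopA_eq]
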